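-- pv_equiv track=rewrite | github.com/EKaviyasindhu/genai_translation | backend/app/services/file_handlers.py | join_tamil_glyphs
-- ===== SOURCE A (Python) =====
-- def join_tamil_glyphs(text):
--     parts = text.split()
--     out = ""
--     for p in parts:
--         if len(p) == 1 or all("\u0B80 <= ch <= \u0BFF" for ch in p):
--             out += p
--         else:
--             out += " " + p + " "
--     return out.strip()
-- ===== SOURCE B (Python) =====
-- def join_tamil_glyphs(text):
--     return "".join(ch for ch in text if not ch.isspace())
-- ===== Notes on version B (the rewrite author's own statement) =====
-- stated objective: idiomatic
-- what changed: A splits text into whitespace-separated tokens and concatenates them in a loop whose else-branch is dead (the all() over a constant truthy string is always True) and then strips; B is a single character-level pass that filters out whitespace characters.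
import Mathlib
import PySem

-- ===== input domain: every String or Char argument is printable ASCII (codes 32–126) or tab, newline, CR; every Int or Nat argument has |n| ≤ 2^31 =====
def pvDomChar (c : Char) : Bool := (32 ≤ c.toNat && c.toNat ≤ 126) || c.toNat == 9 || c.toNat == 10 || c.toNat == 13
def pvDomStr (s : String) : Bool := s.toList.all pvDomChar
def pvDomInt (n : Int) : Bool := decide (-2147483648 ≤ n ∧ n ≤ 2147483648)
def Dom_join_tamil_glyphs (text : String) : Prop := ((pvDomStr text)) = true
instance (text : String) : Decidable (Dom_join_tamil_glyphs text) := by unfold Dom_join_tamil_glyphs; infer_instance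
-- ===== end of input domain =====

-- B removes whitespace in one character-level pass instead of A's token split + concatenation loop with a dead else-branch (idiomatic).

-- ===== PORT A =====
def join_tamil_glyphs (text : String) : String :=
  let parts := PySem.Str.split₀ text
  let out := parts.foldl (fun out p =>
    -- Python: len(p) == 1 or all("\u0B80 <= ch <= \u0BFF" for ch in p);
    -- the generator yields a constant non-empty string, truthy in Python, ported as its non-emptiness
    if (PySem.Str.len p == 1) || p.toList.all (fun _ch => !(("\u0B80 <= ch <= \u0BFF" : String).isEmpty)) then
      out ++ p
    else
      out ++ " " ++ p ++ " ") ""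
  PySem.Str.strip out

-- ===== PORT B =====
def join_tamil_glyphs_alt (text : String) : String :=
  String.ofList (text.toList.filter (fun ch => !PySem.Chars.isspace ch))

-- ===== PRECONDITION & SPEC =====
def Spec_join_tamil_glyphs (text : String) (out : String) : Prop := out = join_tamil_glyphs_alt text
instance (text : String) (out : String) : Decidable (Spec_join_tamil_glyphs text out) := by unfold Spec_join_tamil_glyphs; infer_instance

-- ===== CLAIM (what is proved, stated in full; the proofs are below) =====
def Claim_equal_join_tamil_glyphs : Prop := ∀ (text : String), Dom_join_tamil_glyphs text → Spec_join_tamil_glyphs text (join_tamil_glyphs text)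

-- ===== LEMMAS AND PROOFS =====

-- the flattened words of split₀ are exactly the non-whitespace characters
lemma split₀_go_flatten (s cur : List Char) (acc : List (List Char)) :
    (PySem.Chars.split₀.go s cur acc).flatten
      = acc.reverse.flatten ++ cur.reverse ++ s.filter (fun c => !PySem.Chars.isspace c) := by
  induction s generalizing cur acc with
  | nil =>
    by_cases h : cur = []
    · simp [PySem.Chars.split₀.go, h]
    · simp [PySem.Chars.split₀.go, List.isEmpty_iff, h]
  | cons c rest ih =>
    by_cases hs : PySem.Chars.isspace c = true
    · by_cases h : cur = []
      · simp [PySem.Chars.split₀.go, hs, h, ih]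
      · simp [PySem.Chars.split₀.go, List.isEmpty_iff, hs, h, ih]
    · simp [PySem.Chars.split₀.go, hs, ih]

lemma split₀_flatten (s : List Char) :
    (PySem.Chars.split₀ s).flatten = s.filter (fun c => !PySem.Chars.isspace c) := by
  simpa using split₀_go_flatten s [] []

lemma foldl_append_toList (ps : List String) (acc : String) :
    (ps.foldl (fun out p => out ++ p) acc).toList = acc.toList ++ (ps.map String.toList).flatten := by
  induction ps generalizing acc with
  | nil => simp
  | cons p rest ih => simp [ih]

lemma dropWhile_eq_self_of_all_false (p : Char → Bool) (l : List Char)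
    (h : ∀ c ∈ l, p c = false) : List.dropWhile p l = l := by
  cases l with
  | nil => rfl
  | cons c t => simp [h c (by simp)]

lemma strip_of_no_space (l : List Char) (h : ∀ c ∈ l, PySem.Chars.isspace c = false) :
    PySem.Chars.strip l = l := by
  unfold PySem.Chars.strip PySem.Chars.lstrip PySem.Chars.rstrip
  rw [dropWhile_eq_self_of_all_false _ _ h,
      dropWhile_eq_self_of_all_false _ _ (by intro c hc; exact h c (List.mem_reverse.mp hc)),
      List.reverse_reverse]

-- ===== VERDICT (by name: the statement is the Claim_ definition above) =====
theorem join_tamil_glyphs_spec : Claim_equal_join_tamil_glyphs := by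
  intro text _
  unfold Spec_join_tamil_glyphs join_tamil_glyphs join_tamil_glyphs_alt
  have hcond : ∀ p : String,
      ((PySem.Str.len p == 1) || p.toList.all (fun _ch => !(("\u0B80 <= ch <= \u0BFF" : String).isEmpty))) = true := by
    intro p; simp [String.isEmpty]
  simp only [hcond, if_true]
  apply String.toList_inj.mp
  rw [PySem.Str.toList_strip, foldl_append_toList]
  simp only [PySem.Str.split₀, List.map_map, String.toList_empty]
  have hmap : (PySem.Chars.split₀ text.toList).map (String.toList ∘ String.ofList)
      = PySem.Chars.split₀ text.toList := by
    have hid : (String.toList ∘ String.ofList) = id := funext (fun l => String.toList_ofList)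
    rw [hid, List.map_id]
  rw [hmap, List.nil_append, split₀_flatten]
  rw [strip_of_no_space _ (by intro c hc; simp [List.mem_filter] at hc; simpa using hc.2)]
  exact String.toList_ofList.symm
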